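-- pv_equiv track=rewrite | github.com/merrybabyxmas/raymarching | backbones/reconstruction_decoder.py | _make_channel_schedule
-- ===== SOURCE A (Python) =====
-- def _make_channel_schedule(in_ch: int, steps: int) -> list[int]:
--     """Produce a descending channel schedule of length steps+1."""
--     # Always end just before out_ch (out_ch added separately)
--     targets = [128, 64, 32, 16]
--     schedule = [in_ch]
--     for i in range(steps):
--         if i < len(targets):
--             schedule.append(targets[i])
--         else:
--             schedule.append(max(schedule[-1] // 2, 8))
--     return schedule
-- ===== SOURCE B (Python) =====
-- def _make_channel_schedule(in_ch: int, steps: int) -> list[int]: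
--     """Produce a descending channel schedule of length steps+1."""
--     targets = [128, 64, 32, 16]
--     n = max(0, steps)
--     # After the table ends, max(16 // 2, 8) = 8 is a fixed point, so the tail is a constant run of 8s.
--     return [in_ch] + targets[:n] + [8] * (n - 4)
-- ===== Notes on version B (the rewrite author's own statement) =====
-- stated objective: simpler
-- what changed: Replaces A's branched loop reading schedule[-1] with a closed-form construction: [in_ch] plus the truncated fixed table plus a constant tail of 8s (the halving fixed point), no per-step loop at all.
import Mathlib
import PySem

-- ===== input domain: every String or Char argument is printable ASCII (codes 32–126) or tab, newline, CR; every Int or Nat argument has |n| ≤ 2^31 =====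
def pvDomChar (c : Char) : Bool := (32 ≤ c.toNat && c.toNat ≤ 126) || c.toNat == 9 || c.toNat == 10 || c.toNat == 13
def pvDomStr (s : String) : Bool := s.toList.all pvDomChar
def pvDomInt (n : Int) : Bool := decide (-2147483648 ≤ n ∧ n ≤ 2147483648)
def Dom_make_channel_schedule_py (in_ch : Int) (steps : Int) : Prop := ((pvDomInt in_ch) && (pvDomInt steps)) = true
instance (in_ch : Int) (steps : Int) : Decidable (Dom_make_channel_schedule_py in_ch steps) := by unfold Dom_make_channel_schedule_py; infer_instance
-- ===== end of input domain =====

-- B replaces A's branched loop reading schedule[-1] with a closed-form prefix + constant-tail construction (objective: simpler).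

-- ===== PORT A =====
-- Literal port of A: fold over range(steps), branch on i < len(targets), else append max(schedule[-1] // 2, 8).
def make_channel_schedule_py (in_ch : Int) (steps : Int) : List Int :=
  let targets : List Int := [128, 64, 32, 16]
  (PySem.List.pyRange 0 steps 1).foldl
    (fun schedule i =>
      if i < (targets.length : Int) then
        schedule ++ [PySem.List.pyGetD targets i 0]
      else
        schedule ++ [max (PySem.Int.floordiv (PySem.List.pyGetD schedule (-1) 0) 2) 8])
    [in_ch]

-- ===== PORT B =====
-- Literal port of B: [in_ch] + targets[:n] + [8] * (n - 4) with n = max(0, steps).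
def make_channel_schedule_py_alt (in_ch : Int) (steps : Int) : List Int :=
  let targets : List Int := [128, 64, 32, 16]
  let n : Int := max 0 steps
  [in_ch] ++ PySem.List.slice targets none (some n) ++ List.replicate (n - 4).toNat 8

-- ===== PRECONDITION & SPEC =====
def Spec_make_channel_schedule_py (in_ch : Int) (steps : Int) (out : List Int) : Prop := out = make_channel_schedule_py_alt in_ch steps
instance (in_ch : Int) (steps : Int) (out : List Int) : Decidable (Spec_make_channel_schedule_py in_ch steps out) := by unfold Spec_make_channel_schedule_py; infer_instance

-- ===== CLAIM (what is proved, stated in full; the proofs are below) =====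
def Claim_equal_make_channel_schedule_py : Prop := ∀ (in_ch : Int) (steps : Int), Dom_make_channel_schedule_py in_ch steps → Spec_make_channel_schedule_py in_ch steps (make_channel_schedule_py in_ch steps)

-- ===== LEMMAS AND PROOFS =====

-- closed form for A's fold over range(0, n)
theorem pv_key (in_ch : Int) (n : Nat) :
    make_channel_schedule_py in_ch (n : Int)
      = [in_ch] ++ ([128, 64, 32, 16] : List Int).take n ++ List.replicate (n - 4) 8 := by
  induction n with
  | zero => simp [make_channel_schedule_py, PySem.List.pyRange_one_eq_nil]
  | succ n ih =>
    have hsplit : PySem.List.pyRange 0 ((n + 1 : Nat) : Int) 1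
        = PySem.List.pyRange 0 (n : Int) 1 ++ [(n : Int)] := by
      push_cast
      exact PySem.List.pyRange_one_succ_right (by positivity)
    unfold make_channel_schedule_py at ih ⊢
    rw [hsplit, List.foldl_append]
    rw [ih]
    simp only [List.foldl]
    by_cases h4 : n < 4
    · interval_cases n <;> norm_num [PySem.List.pyGetD] <;> decide
    · -- past the table: the else branch appends max(last // 2, 8) = 8
      obtain ⟨k, rfl⟩ : ∃ k, n = k + 4 := ⟨n - 4, by omega⟩
      rw [if_neg (by simp only [List.length_cons, List.length_nil]; push_cast; omega)]
      cases k with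
      | zero =>
        have hlast : PySem.List.pyGetD ([in_ch] ++ List.take (0 + 4) ([128, 64, 32, 16] : List Int) ++ List.replicate (0 + 4 - 4) 8) (-1) 0 = 16 := by
          rw [show ([in_ch] ++ List.take (0 + 4) ([128, 64, 32, 16] : List Int) ++ List.replicate (0 + 4 - 4) 8) = [in_ch, 128, 64, 32] ++ [16] by simp]
          exact PySem.List.pyGetD_neg_one_append_singleton _ _ _
        rw [hlast]
        norm_num [List.replicate, List.take_add_one]
      | succ k =>
        have hrep : List.replicate (k + 1 + 4 - 4) (8 : Int) = List.replicate k 8 ++ [8] := by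
          simp [List.replicate_succ']
        rw [hrep, show ([in_ch] ++ ([128, 64, 32, 16] : List Int).take (k + 1 + 4) ++ (List.replicate k 8 ++ [8]))
              = ([in_ch] ++ ([128, 64, 32, 16] : List Int).take (k + 1 + 4) ++ List.replicate k 8) ++ [8] by simp,
           PySem.List.pyGetD_neg_one_append_singleton]
        rw [show max (PySem.Int.floordiv 8 2) 8 = 8 by decide]
        simp [List.take_of_length_le (by simp; try omega : ([128, 64, 32, 16] : List Int).length ≤ k + 1 + 4),
              List.replicate_succ', show k + 1 + 4 + 1 - 4 = k + 1 + 1 by omega]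

-- ===== VERDICT (by name: the statement is the Claim_ definition above) =====
theorem make_channel_schedule_py_spec : Claim_equal_make_channel_schedule_py := by
  intro in_ch steps _
  unfold Spec_make_channel_schedule_py make_channel_schedule_py_alt
  by_cases h : steps ≤ 0
  · rw [show max (0 : Int) steps = 0 from by omega]
    simp [make_channel_schedule_py, PySem.List.pyRange_one_eq_nil h, PySem.List.slice_to]
  · rw [show max (0 : Int) steps = steps from by omega,
        show steps = ((steps.toNat : Nat) : Int) from by omega, pv_key]
    have h1 : (max steps 0).toNat = steps.toNat := by omega
    have h2 : (max steps 0 - 4).toNat = steps.toNat - 4 := by omega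
    simp [PySem.List.slice_to, h1, h2]
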